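-- pv_equiv track=rewrite | github.com/skurtyyskirts/TombRaiderLegendRTX- | livetools/analyze.py | _show_intervals_range
-- ===== SOURCE A (Python) =====
-- from collections import Counter, defaultdict
--
-- def _show_intervals_range(records: list[dict], range_str: str) -> str:
--     parts = range_str.split(":")
--     if len(parts) != 2:
--         return "Invalid range format. Use N:M"
--     try:
--         lo, hi = int(parts[0]), int(parts[1])
--     except ValueError:
--         return "Invalid range format. Use N:M"
--
--     by_iv: dict[int, int] = Counter()
--     total = 0
--     for r in records:
--         # Original logic: lo <= (r.get("interval", -1) or -1) <= hi
--         val = r.get("interval", -1)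
--         filter_val = val or -1
--         if lo <= filter_val <= hi:
--             # Original counting logic: by_iv[r.get("interval", 0)] += 1
--             count_val = r.get("interval", 0)
--             by_iv[count_val] += 1
--             total += 1
--
--     lines = [f"Intervals {lo}..{hi}: {total} records", ""]
--     for iv in sorted(by_iv):
--         lines.append(f"  Interval {iv}: {by_iv[iv]} records")
--     return "\n".join(lines)
-- ===== SOURCE B (Python) =====
-- def _show_intervals_range(records: list[dict], range_str: str) -> str:
--     parts = range_str.split(":")
--     if len(parts) != 2:
--         return "Invalid range format. Use N:M"
--     try:
--         lo, hi = int(parts[0]), int(parts[1])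
--     except ValueError:
--         return "Invalid range format. Use N:M"
--
--     # Sort-then-group: collect the count values of all records passing the
--     # filter, sort them, and emit one line per run of equal values.
--     vals = sorted(r.get("interval", 0) for r in records
--                   if lo <= (r.get("interval", -1) or -1) <= hi)
--
--     lines = [f"Intervals {lo}..{hi}: {len(vals)} records", ""]
--     i = 0
--     n = len(vals)
--     while i < n:
--         v = vals[i]
--         j = i + 1
--         while j < n and vals[j] == v:
--             j += 1
--         lines.append(f"  Interval {v}: {j - i} records")
--         i = j
--     return "\n".join(lines)
-- ===== Notes on version B (the rewrite author's own statement) =====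
-- stated objective: alternative
-- what changed: Replaces the Counter hash-aggregation plus key-sort with a sort-then-scan: the filtered count values are collected into a plain list, sorted once, and the per-interval lines are emitted by run-length grouping over the sorted list.
import Mathlib
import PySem

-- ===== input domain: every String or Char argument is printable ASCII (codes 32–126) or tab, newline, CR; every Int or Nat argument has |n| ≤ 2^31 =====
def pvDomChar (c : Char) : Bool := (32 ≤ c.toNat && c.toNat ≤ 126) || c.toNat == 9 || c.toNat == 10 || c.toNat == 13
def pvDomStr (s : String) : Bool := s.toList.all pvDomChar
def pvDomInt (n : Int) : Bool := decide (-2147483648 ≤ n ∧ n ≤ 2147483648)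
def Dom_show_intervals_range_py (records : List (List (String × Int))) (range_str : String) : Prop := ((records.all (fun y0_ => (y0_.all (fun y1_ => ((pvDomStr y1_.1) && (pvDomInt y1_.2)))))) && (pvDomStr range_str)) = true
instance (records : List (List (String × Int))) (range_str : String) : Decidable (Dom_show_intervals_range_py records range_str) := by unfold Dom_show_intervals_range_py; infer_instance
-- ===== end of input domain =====

-- B replaces A's Counter hash-aggregation + key sort by a sort-then-group pass over the filtered values (alternative decomposition, same result).

-- ===== PORT A =====
def pvRecGet (r : List (String × Int)) (k : String) (dflt : Int) : Int :=
  match r.find? (fun p => p.1 == k) with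
  | some p => p.2
  | none => dflt

-- shared by both ports: the identical range-parsing preamble of Source A and Source B
def pvParseRange (range_str : String) : Option (Int × Int) :=
  match PySem.Str.split? range_str ":" with
  | some [p0, p1] =>
    match PySem.Int.ofStr? p0, PySem.Int.ofStr? p1 with
    | some lo, some hi => some (lo, hi)
    | _, _ => none
  | _ => none

def show_intervals_range_py (records : List (List (String × Int))) (range_str : String) : String :=
  match pvParseRange range_str with
  | none => "Invalid range format. Use N:M"
  | some (lo, hi) =>
      let st := records.foldl (fun (st : PySem.Dict Int Int × Int) r =>
        let val := pvRecGet r "interval" (-1)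
        let filter_val := if val == 0 then -1 else val
        if lo ≤ filter_val ∧ filter_val ≤ hi then
          let count_val := pvRecGet r "interval" 0
          (st.1.modify count_val 0 (· + 1), st.2 + 1)
        else st) (PySem.Dict.empty, 0)
      let lines := ["Intervals " ++ PySem.Int.toStr lo ++ ".." ++ PySem.Int.toStr hi ++ ": " ++ PySem.Int.toStr st.2 ++ " records", ""]
      let lines := lines ++ (PySem.List.sorted st.1.keys (fun x => x) false).map
        (fun iv => "  Interval " ++ PySem.Int.toStr iv ++ ": " ++ PySem.Int.toStr (st.1.getD iv 0) ++ " records")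
      PySem.Str.join "\n" lines


-- ===== PORT B =====
def pvRuns : List Int → List (Int × Int)
  | [] => []
  | v :: t =>
    (v, 1 + ((t.takeWhile (fun x => x == v)).length : Int)) :: pvRuns (t.dropWhile (fun x => x == v))
termination_by l => l.length
decreasing_by
  simpa using Nat.lt_succ_of_le (List.length_dropWhile_le _ _)


def show_intervals_range_py_alt (records : List (List (String × Int))) (range_str : String) : String :=
  match pvParseRange range_str with
  | none => "Invalid range format. Use N:M"
  | some (lo, hi) =>
      let vals := PySem.List.sorted
        ((records.filter (fun r =>
            let v := pvRecGet r "interval" (-1)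
            let fv := if v == 0 then -1 else v
            decide (lo ≤ fv ∧ fv ≤ hi))).map (fun r => pvRecGet r "interval" 0))
        (fun x => x) false
      let lines := ["Intervals " ++ PySem.Int.toStr lo ++ ".." ++ PySem.Int.toStr hi ++ ": " ++ PySem.Int.toStr (vals.length : Int) ++ " records", ""]
      let lines := lines ++ (pvRuns vals).map
        (fun p => "  Interval " ++ PySem.Int.toStr p.1 ++ ": " ++ PySem.Int.toStr p.2 ++ " records")
      PySem.Str.join "\n" lines


-- ===== PRECONDITION & SPEC =====
def Spec_show_intervals_range_py (records : List (List (String × Int))) (range_str : String) (out : String) : Prop := out = show_intervals_range_py_alt records range_str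
instance (records : List (List (String × Int))) (range_str : String) (out : String) : Decidable (Spec_show_intervals_range_py records range_str out) := by unfold Spec_show_intervals_range_py; infer_instance

-- ===== CLAIM (what is proved, stated in full; the proofs are below) =====
def Claim_equal_show_intervals_range_py : Prop := ∀ (records : List (List (String × Int))) (range_str : String), Dom_show_intervals_range_py records range_str → Spec_show_intervals_range_py records range_str (show_intervals_range_py records range_str)

-- ===== LEMMAS AND PROOFS =====
theorem pvRuns_cons (v : Int) (t : List Int) :
    pvRuns (v :: t) = (v, 1 + ((t.takeWhile (fun x => x == v)).length : Int)) ::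
      pvRuns (t.dropWhile (fun x => x == v)) := by
  rw [pvRuns]

theorem mem_map_fst_pvRuns (l : List Int) (k : Int) :
    k ∈ (pvRuns l).map Prod.fst ↔ k ∈ l := by
  induction l using pvRuns.induct with
  | case1 => simp [pvRuns]
  | case2 v t ih =>
    rw [pvRuns_cons]
    simp only [List.map_cons, List.mem_cons, ih]
    constructor
    · rintro (rfl | h)
      · simp
      · exact Or.inr ((List.dropWhile_sublist _).mem h)
    · rintro (rfl | h)
      · left; rfl
      · by_cases hk : k ∈ t.dropWhile (fun x => x == v)
        · right; exact hk
        · left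
          have ht : k ∈ t.takeWhile (fun x => x == v) := by
            have hsp := List.takeWhile_append_dropWhile (p := fun x => x == v) (l := t)
            rw [← hsp] at h
            rcases List.mem_append.mp h with h1 | h1
            · exact h1
            · exact absurd h1 hk
          simpa using List.mem_takeWhile_imp ht

theorem not_mem_dropWhile_of_sorted (v : Int) (t : List Int)
    (h : (v :: t).Pairwise (· ≤ ·)) :
    v ∉ t.dropWhile (fun x => x == v) := by
  intro hv
  cases hr : t.dropWhile (fun x => x == v) with
  | nil => rw [hr] at hv; simp at hv
  | cons h0 r' =>
    have hne : (h0 == v) = false := by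
      have hh := List.head?_dropWhile_not (p := fun x => x == v) (l := t)
      rw [hr] at hh
      simpa using hh
    have hh0t : h0 ∈ t := (List.dropWhile_sublist (p := fun x => x == v)).mem (by rw [hr]; simp)
    have hvle : v ≤ h0 := (List.pairwise_cons.mp h).1 h0 hh0t
    rw [hr] at hv
    rcases List.mem_cons.mp hv with rfl | hv'
    · simp at hne
    · have hrs : (t.dropWhile (fun x => x == v)).Pairwise (· ≤ ·) :=
        (List.pairwise_cons.mp h).2.sublist (List.dropWhile_sublist _)
      rw [hr] at hrs
      have hle : h0 ≤ v := (List.pairwise_cons.mp hrs).1 v hv'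
      have : h0 = v := le_antisymm hle hvle
      simp [this] at hne

theorem pvRuns_count (l : List Int) (h : l.Pairwise (· ≤ ·)) :
    ∀ p ∈ pvRuns l, p.2 = (l.count p.1 : Int) := by
  induction l using pvRuns.induct with
  | case1 => simp [pvRuns]
  | case2 v t ih =>
    rw [pvRuns_cons]
    intro p hp
    have hts : t.Pairwise (· ≤ ·) := (List.pairwise_cons.mp h).2
    have hsplit : t.takeWhile (fun x => x == v) ++ t.dropWhile (fun x => x == v) = t :=
      List.takeWhile_append_dropWhile
    have hrest : (t.dropWhile (fun x => x == v)).Pairwise (· ≤ ·) :=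
      hts.sublist (List.dropWhile_sublist _)
    have hvnot : v ∉ t.dropWhile (fun x => x == v) := not_mem_dropWhile_of_sorted v t h
    rcases List.mem_cons.mp hp with rfl | hp'
    · simp only
      have hcr : (t.takeWhile (fun x => x == v)).count v = (t.takeWhile (fun x => x == v)).length := by
        apply List.count_eq_length.mpr
        intro x hx
        have hxv : x = v := by simpa using List.mem_takeWhile_imp hx
        exact hxv.symm
      have hcnt : (v :: t).count v = 1 + (t.takeWhile (fun x => x == v)).length := by
        rw [List.count_cons_self]
        conv_lhs => rw [← hsplit]
        rw [List.count_append, hcr, List.count_eq_zero.mpr hvnot]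
        omega
      rw [hcnt]; push_cast; ring
    · have hk : p.1 ∈ t.dropWhile (fun x => x == v) :=
        (mem_map_fst_pvRuns _ p.1).mp (List.mem_map.mpr ⟨p, hp', rfl⟩)
      have hkv : p.1 ≠ v := fun hh => hvnot (hh ▸ hk)
      have hrunz : (t.takeWhile (fun x => x == v)).count p.1 = 0 := by
        apply List.count_eq_zero.mpr
        intro hx
        exact hkv (by simpa using List.mem_takeWhile_imp hx)
      have hcnt : (v :: t).count p.1 = (t.dropWhile (fun x => x == v)).count p.1 := by
        rw [List.count_cons_of_ne (Ne.symm hkv)]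
        conv_lhs => rw [← hsplit]
        rw [List.count_append, hrunz]
        omega
      rw [hcnt]
      exact ih hrest p hp'

theorem pvRuns_keys_lt (l : List Int) (h : l.Pairwise (· ≤ ·)) :
    ((pvRuns l).map Prod.fst).Pairwise (· < ·) := by
  induction l using pvRuns.induct with
  | case1 => simp [pvRuns]
  | case2 v t ih =>
    rw [pvRuns_cons]
    have hts : t.Pairwise (· ≤ ·) := (List.pairwise_cons.mp h).2
    have hrest : (t.dropWhile (fun x => x == v)).Pairwise (· ≤ ·) :=
      hts.sublist (List.dropWhile_sublist _)
    have hvnot : v ∉ t.dropWhile (fun x => x == v) := not_mem_dropWhile_of_sorted v t h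
    simp only [List.map_cons, List.pairwise_cons]
    refine ⟨?_, ih hrest⟩
    intro k hk
    have hkrest : k ∈ t.dropWhile (fun x => x == v) :=
      (mem_map_fst_pvRuns _ k).mp hk
    have hkt : k ∈ t := (List.dropWhile_sublist (p := fun x => x == v)).mem hkrest
    have hle : v ≤ k := (List.pairwise_cons.mp h).1 k hkt
    have hne : v ≠ k := fun hh => hvnot (hh ▸ hkrest)
    exact lt_of_le_of_ne hle hne

-- the central identity: sorted distinct keys with multiset counts = run-length groups of the sorted list
theorem sorted_keys_map_eq_runs (vs : List Int) (f : Int → Int → String) :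
    (PySem.List.sorted (PySem.Set.ofList vs) (fun x => x) false).map (fun k => f k ((vs.count k : Int)))
      = (pvRuns (PySem.List.sorted vs (fun x => x) false)).map (fun p => f p.1 p.2) := by
  set svs := PySem.List.sorted vs (fun x => x) false with hsvs
  have hperm : svs.Perm vs := PySem.List.sorted_perm _ _ _
  have hs : svs.Pairwise (· ≤ ·) := by
    have := PySem.List.sorted_pairwise (xs := vs) (key := fun x => x)
    simpa [hsvs] using this
  have hkeys : PySem.List.sorted (PySem.Set.ofList vs) (fun x => x) false = (pvRuns svs).map Prod.fst := by
    apply PySem.List.sorted_eq_of_perm_of_pairwise_lt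
    · apply (List.perm_ext_iff_of_nodup ?_ ?_).mpr
      · intro a
        rw [mem_map_fst_pvRuns]
        constructor
        · intro ha; exact (PySem.Set.mem_ofList _ _).mpr (hperm.mem_iff.mp ha)
        · intro ha; exact hperm.mem_iff.mpr ((PySem.Set.mem_ofList _ _).mp ha)
      · exact (pvRuns_keys_lt svs hs).nodup
      · exact PySem.Set.nodup_ofList _
    · exact pvRuns_keys_lt svs hs
  rw [hkeys, List.map_map]
  apply List.map_congr_left
  intro p hp
  simp only [Function.comp]
  rw [pvRuns_count svs hs p hp, hperm.count_eq]

-- A's single aggregation loop = counter of B's filtered value list, plus its length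
theorem foldA_eq (lo hi : Int) (rs : List (List (String × Int))) :
    ∀ (d : PySem.Dict Int Int) (tot : Int),
    rs.foldl (fun (st : PySem.Dict Int Int × Int) r =>
        let val := pvRecGet r "interval" (-1)
        let filter_val := if val == 0 then -1 else val
        if lo ≤ filter_val ∧ filter_val ≤ hi then
          let count_val := pvRecGet r "interval" 0
          (st.1.modify count_val 0 (· + 1), st.2 + 1)
        else st) (d, tot)
      = (((rs.filter (fun r =>
            let v := pvRecGet r "interval" (-1)
            let fv := if v == 0 then -1 else v
            decide (lo ≤ fv ∧ fv ≤ hi))).map (fun r => pvRecGet r "interval" 0)).foldl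
              (fun d x => d.modify x 0 (· + 1)) d,
         tot + (((rs.filter (fun r =>
            let v := pvRecGet r "interval" (-1)
            let fv := if v == 0 then -1 else v
            decide (lo ≤ fv ∧ fv ≤ hi))).map (fun r => pvRecGet r "interval" 0)).length : Int)) := by
  induction rs with
  | nil => intro d tot; simp
  | cons r rs ih =>
    intro d tot
    simp only [List.foldl_cons, List.filter_cons]
    by_cases hc : lo ≤ (if pvRecGet r "interval" (-1) == 0 then -1 else pvRecGet r "interval" (-1)) ∧
        (if pvRecGet r "interval" (-1) == 0 then -1 else pvRecGet r "interval" (-1)) ≤ hi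
    · simp only [hc, and_self, if_true, decide_true, List.map_cons, List.foldl_cons,
        List.length_cons, ih]
      refine Prod.ext rfl ?_
      push_cast; ring
    · simp only [hc, if_false, decide_false, ih]
      rfl
set_option maxHeartbeats 1000000 in
theorem ports_eq (records : List (List (String × Int))) (range_str : String) :
    show_intervals_range_py records range_str = show_intervals_range_py_alt records range_str := by
  unfold show_intervals_range_py show_intervals_range_py_alt
  generalize pvParseRange range_str = po
  cases po with
  | none => rfl
  | some lohi =>
    obtain ⟨lo, hi⟩ := lohi
    simp only [foldA_eq, ← PySem.Dict.counter_eq_foldl, PySem.Dict.keys_counter,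
      PySem.Dict.getD_counter, PySem.List.length_sorted, zero_add]
    rw [sorted_keys_map_eq_runs _ (fun k c => "  Interval " ++ PySem.Int.toStr k ++ ": " ++ PySem.Int.toStr c ++ " records")]

-- ===== VERDICT (by name: the statement is the Claim_ definition above) =====
theorem show_intervals_range_py_spec : Claim_equal_show_intervals_range_py := by
  intro records range_str _
  unfold Spec_show_intervals_range_py
  exact ports_eq records range_str
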